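-- pv_equiv track=rewrite | github.com/KCW9294/Algorithm | 프로그래머스/lv1/42840. 모의고사/모의고사.py | solution
-- ===== SOURCE A (Python) =====
-- def solution(answers):
--     lst_1 = [1,2,3,4,5]*2000
--     lst_2 = [2,1,2,3,2,4,2,5]*1250
--     lst_3 = [3,3,1,1,2,2,4,4,5,5]*1000
--     result = [[1,0],[2,0],[3,0]]
--     answer = []
--     for i in range(len(answers)):
--         if answers[i] == lst_1[i]:
--             result[0][1] += 1
--         if answers[i] == lst_2[i]:
--             result[1][1] += 1
--         if answers[i] == lst_3[i]:
--             result[2][1] += 1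
--     result.sort(key=lambda x: (-x[1], x[0]))
--     if result[0][1]==result[1][1] and result[0][1]!=result[2][1]:
--         answer.append(result[0][0])
--         answer.append(result[1][0])
--     elif result[0][1]==result[2][1]:
--         for i in range(len(result)):
--             answer.append(result[i][0])
--     else:
--         answer.append(result[0][0])
--     return answer
-- ===== SOURCE B (Python) =====
-- def solution(answers):
--     # Histogram pass: bucket answers by index residue mod 40 (lcm of the
--     # three pattern periods) and value; per-element pattern comparisons
--     # disappear -- each score is then just 40 table lookups.
--     freq = {}
--     for i, a in enumerate(answers):
--         key = (i % 40, a)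
--         freq[key] = freq.get(key, 0) + 1
--     p1 = [1, 2, 3, 4, 5]
--     p2 = [2, 1, 2, 3, 2, 4, 2, 5]
--     p3 = [3, 3, 1, 1, 2, 2, 4, 4, 5, 5]
--     s1 = sum(freq.get((r, p1[r % 5]), 0) for r in range(40))
--     s2 = sum(freq.get((r, p2[r % 8]), 0) for r in range(40))
--     s3 = sum(freq.get((r, p3[r % 10]), 0) for r in range(40))
--     top = max(s1, s2, s3)
--     return [p for p, s in ((1, s1), (2, s2), (3, s3)) if s == top]
-- ===== Notes on version B (the rewrite author's own statement) =====
-- stated objective: alternative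
-- what changed: B replaces the per-element comparison against three cyclic pattern lists by a single histogram pass keyed by (index mod 40, answer) -- 40 being the lcm of the three pattern periods -- after which each score is read off with 40 table lookups, and replaces the sort-by-(-score,id) plus three-way tie branching by max plus an ordered filter over the person ids; Pre_ excludes lists longer than 10000, where A's hard-coded 10000-element pattern lists raise IndexError.
import Mathlib
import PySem

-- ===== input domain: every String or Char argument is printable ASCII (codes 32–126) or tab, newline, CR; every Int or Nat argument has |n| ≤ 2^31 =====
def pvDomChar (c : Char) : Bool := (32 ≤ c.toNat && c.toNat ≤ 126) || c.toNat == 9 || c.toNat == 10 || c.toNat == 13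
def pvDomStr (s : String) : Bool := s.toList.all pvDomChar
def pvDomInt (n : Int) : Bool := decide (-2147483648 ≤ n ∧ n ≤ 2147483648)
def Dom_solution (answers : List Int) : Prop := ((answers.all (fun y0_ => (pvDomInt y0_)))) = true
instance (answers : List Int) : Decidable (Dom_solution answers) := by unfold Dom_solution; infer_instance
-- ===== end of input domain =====

-- B builds one frequency table keyed by (index mod 40, answer) — 40 = lcm(5,8,10) — then reads
-- each score off with 40 table lookups instead of comparing every answer with three patterns,
-- and selects winners by max + filter instead of sort + tie branches.

-- ===== PORT A =====
-- lst_1 = [1,2,3,4,5]*2000 etc.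
def pvLst1 : List Int := (List.replicate 2000 ([1, 2, 3, 4, 5] : List Int)).flatten
def pvLst2 : List Int := (List.replicate 1250 ([2, 1, 2, 3, 2, 4, 2, 5] : List Int)).flatten
def pvLst3 : List Int := (List.replicate 1000 ([3, 3, 1, 1, 2, 2, 4, 4, 5, 5] : List Int)).flatten

-- the loop over range(len(answers)): result's three counters, kept as a triple
def pvCountA (answers : List Int) : Int × Int × Int :=
  (PySem.List.pyRange 0 (PySem.List.len answers) 1).foldl
    (fun (c : Int × Int × Int) i =>
      let c := if PySem.List.pyGetD answers i 0 = PySem.List.pyGetD pvLst1 i 0 then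
                 (c.1 + 1, c.2.1, c.2.2) else c
      let c := if PySem.List.pyGetD answers i 0 = PySem.List.pyGetD pvLst2 i 0 then
                 (c.1, c.2.1 + 1, c.2.2) else c
      if PySem.List.pyGetD answers i 0 = PySem.List.pyGetD pvLst3 i 0 then
        (c.1, c.2.1, c.2.2 + 1) else c)
    (0, 0, 0)

-- result.sort(key=lambda x: (-x[1], x[0])) followed by the three tie branches
def pvSelectA (s1 s2 s3 : Int) : List Int :=
  match PySem.List.sorted2 ([(1, s1), (2, s2), (3, s3)] : List (Int × Int))
      (fun x => -x.2) (fun x => x.1) false with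
  | [a, b, cc] =>
      if a.2 = b.2 ∧ a.2 ≠ cc.2 then [a.1, b.1]
      else if a.2 = cc.2 then [a.1, b.1, cc.1]
      else [a.1]
  | _ => []   -- unreachable: sorted2 of a 3-element list has 3 elements

def solution (answers : List Int) : List Int :=
  pvSelectA (pvCountA answers).1 (pvCountA answers).2.1 (pvCountA answers).2.2

-- ===== PORT B =====
def pvPat1 : List Int := [1, 2, 3, 4, 5]
def pvPat2 : List Int := [2, 1, 2, 3, 2, 4, 2, 5]
def pvPat3 : List Int := [3, 3, 1, 1, 2, 2, 4, 4, 5, 5]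

-- for i, a in enumerate(answers): freq[(i % 40, a)] = freq.get((i % 40, a), 0) + 1
def pvFreq (answers : List Int) : PySem.Dict (Int × Int) Int :=
  (PySem.List.enumerate answers 0).foldl
    (fun d ia =>
      d.insert (PySem.Int.mod ia.1 40, ia.2) (d.getD (PySem.Int.mod ia.1 40, ia.2) 0 + 1))
    PySem.Dict.empty

-- s = sum(freq.get((r, pat[r % m]), 0) for r in range(40))
def pvScore (freq : PySem.Dict (Int × Int) Int) (pat : List Int) (m : Int) : Int :=
  (PySem.List.pyRange 0 40 1).foldl
    (fun acc r => acc + freq.getD (r, PySem.List.pyGetD pat (PySem.Int.mod r m) 0) 0) 0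

-- [p for p, s in ((1, s1), (2, s2), (3, s3)) if s == top] with top = max(s1, s2, s3)
def pvSelectB (s1 s2 s3 : Int) : List Int :=
  (([(1, s1), (2, s2), (3, s3)] : List (Int × Int)).filter
      (fun p => p.2 == max s1 (max s2 s3))).map (fun p => p.1)

def solution_alt (answers : List Int) : List Int :=
  let freq := pvFreq answers
  pvSelectB (pvScore freq pvPat1 5) (pvScore freq pvPat2 8) (pvScore freq pvPat3 10)

-- ===== PRECONDITION & SPEC =====
-- Pre_ excludes only lists longer than 10000, on which A raises IndexError
-- (its hard-coded pattern lists have exactly 10000 elements).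
def Pre_solution (answers : List Int) : Prop := answers.length ≤ 10000
instance (answers : List Int) : Decidable (Pre_solution answers) := by unfold Pre_solution; infer_instance
def pvWitness_solution : List Int := ([1, 2, 3, 4, 5] : List Int)

def Spec_solution (answers : List Int) (out : List Int) : Prop := out = solution_alt answers
instance (answers : List Int) (out : List Int) : Decidable (Spec_solution answers out) := by unfold Spec_solution; infer_instance

-- ===== CLAIM (what is proved, stated in full; the proofs are below) =====
def Claim_equal_solution : Prop := ∀ (answers : List Int), Dom_solution answers → Pre_solution answers → Spec_solution answers (solution answers)

-- ===== LEMMAS AND PROOFS =====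

-- PySem.Int.mod is Python's fmod; for a positive divisor it is Lean's emod
lemma pymod_pos (a b : Int) (hb : 0 < b) : PySem.Int.mod a b = a % b := by
  unfold PySem.Int.mod
  rw [Int.fmod_eq_emod]
  simp [hb.le]

-- indexing the flattened repeated pattern is indexing the pattern at the residue
lemma getD_flatten_replicate (l : List Int) (n k : Nat) (h : k < n * l.length) :
    ((List.replicate n l).flatten).getD k 0 = l.getD (k % l.length) 0 := by
  induction n generalizing k with
  | zero => omega
  | succ m ih =>
    have hl : 0 < l.length := by by_contra h0; simp at h0; simp [h0] at h
    have hmul : (m + 1) * l.length = m * l.length + l.length := Nat.succ_mul m l.length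
    rw [List.replicate_succ, List.flatten_cons]
    by_cases hk : k < l.length
    · rw [List.getD_eq_getElem?_getD, List.getElem?_append_left hk,
        Nat.mod_eq_of_lt hk, ← List.getD_eq_getElem?_getD]
    · push_neg at hk
      rw [List.getD_eq_getElem?_getD, List.getElem?_append_right hk,
        ← List.getD_eq_getElem?_getD, ih (k - l.length) (by omega)]
      congr 1
      rw [Nat.mod_eq_sub_mod hk]

lemma pyGetD_flat (l : List Int) (n k : Nat) (m : Int) (hm : (l.length : Int) = m)
    (hk : k < n * l.length) :
    PySem.List.pyGetD ((List.replicate n l).flatten) (k : Int) 0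
      = PySem.List.pyGetD l (PySem.Int.mod (k : Int) m) 0 := by
  subst hm
  have hl : 0 < l.length := by by_contra h0; simp at h0; simp [h0] at hk
  have hmod : PySem.Int.mod (k : Int) (l.length : Int) = ((k % l.length : Nat) : Int) := by
    rw [pymod_pos _ _ (by exact_mod_cast hl)]
    omega
  rw [hmod, PySem.List.pyGetD_natCast, PySem.List.pyGetD_natCast,
    getD_flatten_replicate l n k hk]

-- A's three-counter loop is three countP's
lemma foldl_triple {ι : Type} (l : List ι) (q1 q2 q3 : ι → Prop)
    [DecidablePred q1] [DecidablePred q2] [DecidablePred q3] (a b c : Int) :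
    l.foldl
      (fun (s : Int × Int × Int) i =>
        let s := if q1 i then (s.1 + 1, s.2.1, s.2.2) else s
        let s := if q2 i then (s.1, s.2.1 + 1, s.2.2) else s
        if q3 i then (s.1, s.2.1, s.2.2 + 1) else s)
      (a, b, c)
      = (a + l.countP (fun i => decide (q1 i)),
         b + l.countP (fun i => decide (q2 i)),
         c + l.countP (fun i => decide (q3 i))) := by
  induction l generalizing a b c with
  | nil => simp
  | cons x xs ih =>
    simp only [List.foldl_cons, List.countP_cons]
    by_cases h1 : q1 x <;> by_cases h2 : q2 x <;> by_cases h3 : q3 x <;>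
      simp only [h1, h2, h3, if_true, if_false, ih, Prod.mk.injEq,
        decide_true, decide_false] <;>
      refine ⟨by push_cast; ring, by push_cast; ring, by push_cast; ring⟩

-- sums of mapped additions split
lemma list_sum_map_add (R : List Int) (f g : Int → Int) :
    (R.map (fun r => f r + g r)).sum = (R.map f).sum + (R.map g).sum := by
  induction R with
  | nil => simp
  | cons r R ih => simp [ih]; ring

-- a sum of indicators over R collapses when the key occurs once in R
lemma sum_indicator_not_mem (R : List Int) (val : Int → Int) (k v : Int) (hk : k ∉ R) :
    (R.map (fun r => if k = r ∧ v = val r then (1 : Int) else 0)).sum = 0 := by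
  induction R with
  | nil => simp
  | cons r R' ih =>
    simp only [List.mem_cons, not_or] at hk
    simp [hk.1, ih hk.2]

lemma sum_indicator (R : List Int) (hR : R.Nodup) (val : Int → Int) (k v : Int) (hk : k ∈ R) :
    (R.map (fun r => if k = r ∧ v = val r then (1 : Int) else 0)).sum
      = if v = val k then 1 else 0 := by
  induction R with
  | nil => simp at hk
  | cons r R' ih =>
    rcases List.nodup_cons.mp hR with ⟨hr, hR'⟩
    by_cases hrk : r = k
    · subst hrk
      rw [List.map_cons, List.sum_cons, sum_indicator_not_mem R' val r v hr]
      simp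
    · have hk' : k ∈ R' := by
        rcases List.mem_cons.mp hk with h | h
        · exact absurd h.symm hrk
        · exact h
      have hne : ¬ k = r := fun h => hrk h.symm
      simp [hne, ih hR' hk']

-- summing per-residue counts of (r, val r) over the residues = one countP
lemma sum_count_partition (l : List (Int × Int)) (val : Int → Int) (R : List Int)
    (hR : R.Nodup) (hmem : ∀ x ∈ l, PySem.Int.mod x.1 40 ∈ R) :
    (R.map (fun r =>
        (((l.map (fun ia => ((PySem.Int.mod ia.1 40, ia.2) : Int × Int))).count
            ((r, val r) : Int × Int)) : Int))).sum
      = ((l.countP (fun ia => ia.2 == val (PySem.Int.mod ia.1 40))) : Int) := by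
  induction l with
  | nil => simp
  | cons x xs ih =>
    have hx : PySem.Int.mod x.1 40 ∈ R := hmem x List.mem_cons_self
    have hxs : ∀ y ∈ xs, PySem.Int.mod y.1 40 ∈ R := fun y hy => hmem y (List.mem_cons_of_mem x hy)
    simp only [List.map_cons, List.count_cons, List.countP_cons]
    have hnorm : ∀ r : Int,
        ((((xs.map (fun ia => ((PySem.Int.mod ia.1 40, ia.2) : Int × Int))).count
              ((r, val r) : Int × Int))
          + if (((PySem.Int.mod x.1 40, x.2) : Int × Int) == (r, val r)) = true then 1 else 0 : Nat) : Int)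
        = (((xs.map (fun ia => ((PySem.Int.mod ia.1 40, ia.2) : Int × Int))).count
              ((r, val r) : Int × Int)) : Int)
          + (if PySem.Int.mod x.1 40 = r ∧ x.2 = val r then (1 : Int) else 0) := by
      intro r
      have hcond : ((((PySem.Int.mod x.1 40, x.2) : Int × Int) == (r, val r)) = true)
          = (PySem.Int.mod x.1 40 = r ∧ x.2 = val r) := by
        simp only [beq_iff_eq, Prod.mk.injEq]
      simp only [hcond]
      split_ifs <;> push_cast <;> ring
    simp only [hnorm]
    rw [list_sum_map_add, ih hxs,
      sum_indicator R hR val (PySem.Int.mod x.1 40) x.2 hx]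
    by_cases hv : x.2 = val (PySem.Int.mod x.1 40) <;> simp [hv] <;> push_cast <;> ring

-- B's frequency loop: a lookup is a count over the key list
lemma getD_pvfold (l : List (Int × Int)) (d : PySem.Dict (Int × Int) Int) (k : Int × Int) :
    (l.foldl
      (fun d ia =>
        d.insert (PySem.Int.mod ia.1 40, ia.2) (d.getD (PySem.Int.mod ia.1 40, ia.2) 0 + 1))
      d).getD k 0
    = d.getD k 0 + ((l.map (fun ia => ((PySem.Int.mod ia.1 40, ia.2) : Int × Int))).count k : Int) := by
  induction l generalizing d with
  | nil => simp
  | cons x xs ih =>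
    simp only [List.foldl_cons, List.map_cons, List.count_cons]
    rw [ih, PySem.Dict.getD_insert]
    have hcond : (((((PySem.Int.mod x.1 40, x.2)) : Int × Int) == k) = true)
        = (k = (PySem.Int.mod x.1 40, x.2)) := by
      simp only [beq_iff_eq]
      exact propext ⟨fun hh => hh.symm, fun hh => hh.symm⟩
    simp only [hcond]
    split_ifs with h
    · subst h; push_cast; ring
    · push_cast; ring

-- B's score = countP of matching the pattern at i mod m, over the index range
lemma score_eq_countP (answers : List Int) (pat : List Int) (m : Int)
    (hm : 0 < m) (hdvd : m ∣ 40) :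
    pvScore (pvFreq answers) pat m
      = ((PySem.List.pyRange 0 (PySem.List.len answers) 1).countP
          (fun i => PySem.List.pyGetD answers i 0 == PySem.List.pyGetD pat (PySem.Int.mod i m) 0) : Int) := by
  unfold pvScore pvFreq
  rw [PySem.List.foldl_add]
  simp only [getD_pvfold, PySem.Dict.getD_empty, zero_add]
  have hR : (PySem.List.pyRange 0 40 1).Nodup := by decide
  have hmem : ∀ ia ∈ PySem.List.enumerate answers 0,
      PySem.Int.mod ia.1 40 ∈ PySem.List.pyRange 0 40 1 := by
    intro ia hia
    rcases (PySem.List.mem_enumerate_iff _ _ _).mp hia with ⟨k, hk, rfl⟩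
    rw [PySem.List.mem_pyRange_one, pymod_pos _ _ (by norm_num)]
    constructor
    · exact Int.emod_nonneg _ (by norm_num)
    · exact Int.emod_lt_of_pos _ (by norm_num)
  rw [sum_count_partition (PySem.List.enumerate answers 0)
    (fun r => PySem.List.pyGetD pat (PySem.Int.mod r m) 0)
    (PySem.List.pyRange 0 40 1) hR hmem]
  rw [PySem.List.enumerate_eq_map_pyRange answers 0, List.countP_map]
  congr 1
  apply List.countP_congr
  intro i hi
  rcases (PySem.List.mem_pyRange_one).mp hi with ⟨h0, _⟩
  have hmodmod : PySem.Int.mod (i % 40) m = PySem.Int.mod i m := by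
    rw [pymod_pos _ _ hm, pymod_pos _ _ hm]
    exact Int.emod_emod_of_dvd i hdvd
  simp [hmodmod]

-- A's counters equal B's scores (for lists of length ≤ 10000)
lemma counts_eq (answers : List Int) (h : answers.length ≤ 10000) :
    pvCountA answers
      = (pvScore (pvFreq answers) pvPat1 5,
         pvScore (pvFreq answers) pvPat2 8,
         pvScore (pvFreq answers) pvPat3 10) := by
  unfold pvCountA
  rw [foldl_triple]
  rw [score_eq_countP answers pvPat1 5 (by norm_num) (by norm_num),
      score_eq_countP answers pvPat2 8 (by norm_num) (by norm_num),
      score_eq_countP answers pvPat3 10 (by norm_num) (by norm_num)]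
  have hcong : ∀ (L P : List Int) (m : Int),
      (∀ k : Nat, k < 10000 →
        PySem.List.pyGetD L (k : Int) 0 = PySem.List.pyGetD P (PySem.Int.mod (k : Int) m) 0) →
      (PySem.List.pyRange 0 (PySem.List.len answers) 1).countP
          (fun i => decide (PySem.List.pyGetD answers i 0 = PySem.List.pyGetD L i 0))
        = (PySem.List.pyRange 0 (PySem.List.len answers) 1).countP
          (fun i => PySem.List.pyGetD answers i 0 == PySem.List.pyGetD P (PySem.Int.mod i m) 0) := by
    intro L P m hLP
    apply List.countP_congr
    intro i hi
    rcases (PySem.List.mem_pyRange_one).mp hi with ⟨h0, hlt⟩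
    simp only [PySem.List.len_eq] at hlt
    obtain ⟨k, rfl⟩ : ∃ k : Nat, i = (k : Int) := ⟨i.toNat, (Int.toNat_of_nonneg h0).symm⟩
    have hk : k < 10000 := by omega
    rw [hLP k hk]
    simp [beq_iff_eq]
  rw [hcong pvLst1 pvPat1 5
        (fun k hk => pyGetD_flat ([1,2,3,4,5] : List Int) 2000 k 5 (by norm_num) (by simp; omega)),
      hcong pvLst2 pvPat2 8
        (fun k hk => pyGetD_flat ([2,1,2,3,2,4,2,5] : List Int) 1250 k 8 (by norm_num) (by simp; omega)),
      hcong pvLst3 pvPat3 10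
        (fun k hk => pyGetD_flat ([3,3,1,1,2,2,4,4,5,5] : List Int) 1000 k 10 (by norm_num) (by simp; omega))]
  simp

set_option maxRecDepth 8000 in
lemma select_eq (s1 s2 s3 : Int) : pvSelectA s1 s2 s3 = pvSelectB s1 s2 s3 := by
  unfold pvSelectA pvSelectB
  rcases lt_trichotomy s1 s2 with h12|h12|h12 <;>
    rcases lt_trichotomy s1 s3 with h13|h13|h13 <;>
      rcases lt_trichotomy s2 s3 with h23|h23|h23 <;>
        simp_all [PySem.List.sorted2, PySem.List.insertBy, beq_iff_eq,
          le_of_lt, not_lt_of_gt, List.filter_cons] <;>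
        split_ifs <;>
        (try simp only [List.map_cons, List.map_nil, List.cons.injEq,
          and_true, true_and] at *) <;>
        omega

-- ===== VERDICT (by name: the statement is the Claim_ definition above) =====
theorem solution_spec : Claim_equal_solution := by
  intro answers _ hpre
  unfold Spec_solution solution solution_alt
  rw [counts_eq answers hpre]
  exact select_eq _ _ _
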